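-- pv_equiv track=rewrite | github.com/SebinYu-hub/PS2 | solution/24.py | solution
-- ===== SOURCE A (Python) =====
-- from collections import defaultdict
--
-- def solution(id_list, report, k):
--     # 신고자별 신고한 사용자 집합
--     reporters = defaultdict(set)
--     # 사용자별 신고당한 횟수
--     reported_count = defaultdict(int)
--     # 처리 결과 메일 수신 횟수
--     mail_count = defaultdict(int)
--
--     # 신고 기록 처리 (중복 신고는 set으로 자동 처리)
--     for r in report:
--         reporter, reported = r.split()
--         # 이전에 신고하지 않은 경우에만 처리
--         if reported not in reporters[reporter]:
--             reporters[reporter].add(reported)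
--             reported_count[reported] += 1
--
--     # 메일 발송 처리
--     for reporter in reporters:
--         # 해당 신고자가 신고한 사용자들 중
--         # k번 이상 신고된 사용자 수만큼 메일 받음
--         mail_count[reporter] = sum(
--             1 for reported in reporters[reporter]
--             if reported_count[reported] >= k
--         )
--
--     # id_list 순서대로 메일 수신 횟수 반환
--     return [mail_count[user_id] for user_id in id_list]
-- ===== SOURCE B (Python) =====
-- def solution(id_list, report, k):
--     # unique reports, first occurrences, no dict/set machinery
--     uniq = []
--     for r in report:
--         p = tuple(r.split())
--         if p not in uniq:
--             uniq.append(p)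
--
--     def times_reported(v):
--         return sum(1 for _, y in uniq if y == v)
--
--     return [sum(1 for a, b in uniq if a == u and times_reported(b) >= k)
--             for u in id_list]
-- ===== Notes on version B (the rewrite author's own statement) =====
-- stated objective: alternative
-- what changed: Drops all three dictionaries of A (per-reporter sets, reported_count, mail_count): B keeps one flat list of unique reports built by list membership and answers each id directly by nested counting comprehensions (recount the reported user's total inside the per-id count), trading A's hash indexing for brute-force quadratic scans.
import Mathlib
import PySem

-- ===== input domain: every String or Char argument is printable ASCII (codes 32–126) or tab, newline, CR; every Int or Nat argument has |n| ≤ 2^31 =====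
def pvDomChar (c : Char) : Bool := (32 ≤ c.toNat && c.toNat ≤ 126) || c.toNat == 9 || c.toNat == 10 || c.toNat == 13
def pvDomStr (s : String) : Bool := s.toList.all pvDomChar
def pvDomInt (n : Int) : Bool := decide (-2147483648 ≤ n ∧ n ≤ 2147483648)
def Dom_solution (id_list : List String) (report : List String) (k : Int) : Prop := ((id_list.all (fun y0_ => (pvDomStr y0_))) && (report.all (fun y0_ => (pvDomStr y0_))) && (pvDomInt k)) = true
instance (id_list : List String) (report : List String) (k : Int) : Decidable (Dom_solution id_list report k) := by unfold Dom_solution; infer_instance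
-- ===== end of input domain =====

-- B drops A's three dictionaries: it keeps one flat list of unique reports (dedup by list
-- membership) and answers each id by direct nested counting (objective: alternative; not faster).

-- shared unpacking plumbing: 'reporter, reported = r.split()' / 'tuple(r.split())';
-- the ("","") fallback is outside Pre_solution (Python raises ValueError there)
def pvSplit2 (r : String) : String × String :=
  match PySem.Str.split₀ r with
  | [a, b] => (a, b)
  | _ => ("", "")

-- ===== PORT A =====
def solution (id_list : List String) (report : List String) (k : Int) : List Int :=
  let st := report.foldl
    (fun (st : PySem.Dict String (PySem.Set String) × PySem.Dict String Int) r =>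
      let reporter := (pvSplit2 r).1
      let reported := (pvSplit2 r).2
      -- defaultdict access 'reporters[reporter]' creates the key, hence the re-insert in both branches
      let s := st.1.getD reporter PySem.Set.empty
      if PySem.Set.contains s reported then (st.1.insert reporter s, st.2)
      else (st.1.insert reporter (PySem.Set.add s reported), st.2.modify reported 0 (· + 1)))
    (PySem.Dict.empty, PySem.Dict.empty)
  -- 'for reporter in reporters: mail_count[reporter] = sum(1 for reported in ... if ...)'
  let mail := st.1.keys.foldl
    (fun (m : PySem.Dict String Int) reporter =>
      m.insert reporter
        (((st.1.getD reporter PySem.Set.empty).map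
            (fun reported => if k ≤ st.2.getD reported 0 then (1 : Int) else 0)).sum))
    PySem.Dict.empty
  id_list.map (fun u => mail.getD u 0)

-- ===== PORT B =====
def solution_alt (id_list : List String) (report : List String) (k : Int) : List Int :=
  -- 'for r in report: p = tuple(r.split()); if p not in uniq: uniq.append(p)'
  let uniq := report.foldl
    (fun (acc : List (String × String)) r =>
      let p := pvSplit2 r
      if p ∈ acc then acc else acc ++ [p]) []
  -- 'def times_reported(v): return sum(1 for _, y in uniq if y == v)'
  let timesReported := fun (v : String) =>
    ((uniq.map (fun q => if q.2 == v then (1 : Int) else 0)).sum)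
  -- '[sum(1 for a, b in uniq if a == u and times_reported(b) >= k) for u in id_list]'
  id_list.map (fun u =>
    ((uniq.map (fun p =>
        if p.1 == u && decide (k ≤ timesReported p.2) then (1 : Int) else 0)).sum))

-- ===== PRECONDITION & SPEC =====
-- Python A raises ValueError ('reporter, reported = r.split()') unless every report splits into exactly two words
def Pre_solution (id_list : List String) (report : List String) (k : Int) : Prop :=
  ∀ r ∈ report, (PySem.Str.split₀ r).length = 2
instance (id_list : List String) (report : List String) (k : Int) : Decidable (Pre_solution id_list report k) := by unfold Pre_solution; infer_instance

def pvWitness_solution : List String × List String × Int :=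
  (["muzi", "frodo", "apeach", "neo"],
   ["muzi frodo", "apeach frodo", "frodo neo", "muzi neo", "apeach muzi"], 2)

def Spec_solution (id_list : List String) (report : List String) (k : Int) (out : List Int) : Prop := out = solution_alt id_list report k
instance (id_list : List String) (report : List String) (k : Int) (out : List Int) : Decidable (Spec_solution id_list report k out) := by unfold Spec_solution; infer_instance

-- ===== CLAIM (what is proved, stated in full; the proofs are below) =====
def Claim_equal_solution : Prop := ∀ (id_list : List String) (report : List String) (k : Int), Dom_solution id_list report k → Pre_solution id_list report k → Spec_solution id_list report k (solution id_list report k)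

-- ===== LEMMAS AND PROOFS =====

def pvStepA (st : PySem.Dict String (PySem.Set String) × PySem.Dict String Int)
    (p : String × String) :
    PySem.Dict String (PySem.Set String) × PySem.Dict String Int :=
  let s := st.1.getD p.1 PySem.Set.empty
  if PySem.Set.contains s p.2 then (st.1.insert p.1 s, st.2)
  else (st.1.insert p.1 (PySem.Set.add s p.2), st.2.modify p.2 0 (· + 1))

theorem pvStateA_inv (q : List (String × String)) :
    (∀ a, ((q.foldl pvStepA (PySem.Dict.empty, PySem.Dict.empty)).1.getD a PySem.Set.empty)
        = ((PySem.List.dedup q).filter (fun p => p.1 == a)).map (·.2)) ∧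
    (∀ v, ((q.foldl pvStepA (PySem.Dict.empty, PySem.Dict.empty)).2.getD v 0)
        = ((PySem.List.dedup q).countP (fun p => p.2 == v) : Int)) ∧
    (q.foldl pvStepA (PySem.Dict.empty, PySem.Dict.empty)).1.keys
        = PySem.Set.ofList (q.map (·.1)) := by
  induction q using List.reverseRecOn with
  | nil => refine ⟨?_, ?_, ?_⟩ <;> simp [pysem]
  | append_singleton q p ih =>
    obtain ⟨ih1, ih2, ih3⟩ := ih
    rw [List.foldl_append] at *
    set st := q.foldl pvStepA (PySem.Dict.empty, PySem.Dict.empty) with hst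
    have hded : PySem.List.dedup (q ++ [p]) = PySem.Set.add (PySem.List.dedup q) p := by
      simp [PySem.Set.ofList_append_singleton]
    have hmapfst : (q ++ [p]).map (fun x => x.1) = q.map (fun x => x.1) ++ [p.1] := by simp
    have hmem : p.2 ∈ (st.1.getD p.1 PySem.Set.empty) ↔ p ∈ PySem.List.dedup q := by
      rw [ih1]
      simp only [List.mem_map, List.mem_filter, beq_iff_eq]
      constructor
      · rintro ⟨x, ⟨hx, hx1⟩, hx2⟩
        have : x = p := Prod.ext hx1 hx2
        exact this ▸ hx
      · intro hp
        exact ⟨p, ⟨hp, rfl⟩, rfl⟩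
    by_cases hp : p ∈ q
    · have hpd : p ∈ PySem.List.dedup q := by simpa [PySem.List.mem_dedup] using hp
      have hc : PySem.Set.contains (st.1.getD p.1 PySem.Set.empty) p.2 = true := by
        rw [PySem.Set.contains_iff]; exact hmem.mpr hpd
      have hstep : List.foldl pvStepA st [p] = (st.1.insert p.1 (st.1.getD p.1 PySem.Set.empty), st.2) := by
        simp only [List.foldl_cons, List.foldl_nil, pvStepA]
        rw [if_pos hc]
      rw [hstep]
      dsimp only
      have hadd : PySem.Set.add (PySem.List.dedup q) p = PySem.List.dedup q :=
        PySem.Set.add_of_mem hpd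
      have hk1 : p.1 ∈ st.1.keys := by
        rw [ih3, PySem.Set.mem_ofList]; exact List.mem_map_of_mem hp
      refine ⟨?_, ?_, ?_⟩
      · intro a
        rw [hded, hadd, PySem.Dict.getD_insert]
        split_ifs with ha
        · subst ha; exact ih1 _
        · exact ih1 a
      · intro v; rw [hded, hadd]; exact ih2 v
      · rw [PySem.Dict.keys_insert_of_contains _ _ ((PySem.Dict.contains_iff_mem_keys _ _).mpr hk1),
            hmapfst, PySem.Set.ofList_append_singleton, ih3,
            PySem.Set.add_of_mem (by rw [PySem.Set.mem_ofList]; exact List.mem_map_of_mem hp)]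
    · have hpd : p ∉ PySem.List.dedup q := by simpa [PySem.List.mem_dedup] using hp
      have hc : PySem.Set.contains (st.1.getD p.1 PySem.Set.empty) p.2 = false := by
        rw [Bool.eq_false_iff, Ne, PySem.Set.contains_iff]
        intro h; exact hpd (hmem.mp h)
      have hs2 : p.2 ∉ st.1.getD p.1 PySem.Set.empty := fun h => hpd (hmem.mp h)
      have hstep : List.foldl pvStepA st [p]
          = (st.1.insert p.1 (PySem.Set.add (st.1.getD p.1 PySem.Set.empty) p.2),
             st.2.modify p.2 0 (· + 1)) := by
        simp only [List.foldl_cons, List.foldl_nil, pvStepA]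
        rw [if_neg (by simpa using hs2)]
      rw [hstep, hded, PySem.Set.add_of_not_mem hpd]
      dsimp only
      refine ⟨?_, ?_, ?_⟩
      · intro a
        rw [PySem.Dict.getD_insert]
        split_ifs with ha
        · subst ha
          rw [PySem.Set.add_of_not_mem hs2, ih1]
          simp [List.filter_append]
        · rw [ih1]
          have : p.1 ≠ a := fun h => ha h.symm
          simp [List.filter_append, this]
      · intro v
        rw [PySem.Dict.getD_modify]
        split_ifs with hv
        · subst hv
          rw [ih2]
          simp [List.countP_append]
        · rw [ih2]
          have : ¬ (p.2 == v) = true := by simp; exact fun h => hv h.symm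
          simp [List.countP_append, this]
      · rw [hmapfst, PySem.Set.ofList_append_singleton, ← ih3]
        by_cases hk : p.1 ∈ st.1.keys
        · rw [PySem.Dict.keys_insert_of_contains _ _ ((PySem.Dict.contains_iff_mem_keys _ _).mpr hk),
              PySem.Set.add_of_mem hk]
        · rw [PySem.Dict.keys_insert_of_not_contains _ _
              (by rw [Bool.eq_false_iff, Ne, PySem.Dict.contains_iff_mem_keys]; exact hk),
              PySem.Set.add_of_not_mem hk]

def pvCountF (q : List (String × String)) (k : Int) (u : String) : Nat :=
  (PySem.List.dedup q).countP
    (fun p => p.1 == u &&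
      decide (k ≤ ((PySem.List.dedup q).countP (fun p' => p'.2 == p.2) : Int)))

theorem pvMail_getD (R : PySem.Dict String (PySem.Set String)) (C : PySem.Dict String Int)
    (q : List (String × String)) (k : Int) (u : String)
    (h1 : ∀ a, R.getD a PySem.Set.empty
        = ((PySem.List.dedup q).filter (fun p => p.1 == a)).map (·.2))
    (h2 : ∀ v, C.getD v 0 = ((PySem.List.dedup q).countP (fun p => p.2 == v) : Int))
    (h3 : R.keys = PySem.Set.ofList (q.map (·.1))) :
    (R.keys.foldl (fun m a => m.insert a
        (((R.getD a PySem.Set.empty).map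
            (fun v => if k ≤ C.getD v 0 then (1 : Int) else 0)).sum))
      PySem.Dict.empty).getD u 0 = (pvCountF q k u : Int) := by
  have hnd : R.keys.Nodup := by rw [h3]; exact PySem.Set.nodup_ofList _
  have hsum : ∀ (L : List String),
      ((L.map (fun v => if k ≤ C.getD v 0 then (1 : Int) else 0)).sum)
        = (L.countP (fun v => decide (k ≤ C.getD v 0)) : Int) := by
    intro L
    rw [← PySem.List.sum_map_ite_one_zero]
    exact congrArg List.sum (List.map_congr_left (fun a _ => by simp))
  set mail := R.keys.foldl (fun m a => m.insert a
        (((R.getD a PySem.Set.empty).map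
            (fun v => if k ≤ C.getD v 0 then (1 : Int) else 0)).sum))
      PySem.Dict.empty with hmail
  have hitems : mail.items = R.keys.map (fun a => (a,
      ((R.getD a PySem.Set.empty).map
          (fun v => if k ≤ C.getD v 0 then (1 : Int) else 0)).sum)) := by
    rw [hmail]
    simpa using PySem.Dict.items_foldl_insert_fresh (l := R.keys) (k := fun a => a)
      (v := fun a => (((R.getD a PySem.Set.empty).map
          (fun v => if k ≤ C.getD v 0 then (1 : Int) else 0)).sum))
      (d := PySem.Dict.empty)
      (fun a _ => by simp [pysem]) (by simpa using hnd)
  have hmkeys : mail.keys = R.keys := by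
    simp only [PySem.Dict.keys]
    rw [hitems]
    simp [Function.comp_def]
    rfl
  by_cases hu : u ∈ R.keys
  · have hmem : (u, ((R.getD u PySem.Set.empty).map
        (fun v => if k ≤ C.getD v 0 then (1 : Int) else 0)).sum) ∈ mail.items := by
      rw [hitems]
      exact List.mem_map.mpr ⟨u, hu, rfl⟩
    rw [PySem.Dict.getD_of_mem_items mail hmem (by rw [hmkeys]; exact hnd)]
    rw [hsum, h1]
    rw [List.countP_map, List.countP_filter]
    unfold pvCountF
    exact_mod_cast congrArg Nat.cast (List.countP_congr (fun x hx => by simp [h2, Bool.and_comm]))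
  · have hc : mail.contains u = false := by
      rw [Bool.eq_false_iff, Ne, PySem.Dict.contains_iff_mem_keys, hmkeys]
      exact hu
    rw [PySem.Dict.getD_of_not_contains mail 0 hc]
    unfold pvCountF
    rw [List.countP_eq_zero.mpr ?_]
    · simp
    · intro p hp
      simp only [Bool.and_eq_true, beq_iff_eq, decide_eq_true_eq, not_and]
      intro hpu _
      exact absurd (by rw [h3, PySem.Set.mem_ofList]
                       exact hpu ▸ List.mem_map_of_mem (by simpa [PySem.List.mem_dedup] using hp)) hu

-- B's dedup loop ('if p not in uniq: uniq.append(p)') builds exactly PySem.List.dedup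
theorem pvUniq_eq (report : List String) :
    report.foldl
      (fun (acc : List (String × String)) r =>
        let p := pvSplit2 r
        if p ∈ acc then acc else acc ++ [p]) []
    = PySem.List.dedup (report.map pvSplit2) := by
  rw [← List.foldl_map (f := pvSplit2)
      (g := fun (acc : List (String × String)) p => if p ∈ acc then acc else acc ++ [p])]
  rw [PySem.List.dedup_eq_ofList, PySem.Set.ofList_eq_foldl]
  apply PySem.List.foldl_congr_mem
  intro acc x _
  by_cases hx : x ∈ acc
  · simp [hx, PySem.Set.add, (PySem.Set.contains_iff acc x).mpr hx]
  · have : PySem.Set.contains acc x = false := by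
      rw [Bool.eq_false_iff, Ne, PySem.Set.contains_iff]; exact hx
    simp [hx, PySem.Set.add, this]

-- B's per-id nested count equals pvCountF
theorem pvB_entry (q : List (String × String)) (k : Int) (u : String) :
    (((PySem.List.dedup q).map (fun p =>
        if p.1 == u && decide (k ≤ (((PySem.List.dedup q).map
            (fun q' => if q'.2 == p.2 then (1 : Int) else 0)).sum))
        then (1 : Int) else 0)).sum) = (pvCountF q k u : Int) := by
  have hin : ∀ v, (((PySem.List.dedup q).map
      (fun q' => if q'.2 == v then (1 : Int) else 0)).sum)
      = ((PySem.List.dedup q).countP (fun p' => p'.2 == v) : Int) := by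
    intro v
    rw [← PySem.List.sum_map_ite_one_zero]
  unfold pvCountF
  rw [← PySem.List.sum_map_ite_one_zero]
  exact congrArg List.sum (List.map_congr_left (fun p _ => by rw [hin p.2]))

theorem solution_eq_alt (id_list report : List String) (k : Int) :
    solution id_list report k = solution_alt id_list report k := by
  obtain ⟨h1, h2, h3⟩ := pvStateA_inv (report.map pvSplit2)
  simp only [solution, solution_alt]
  rw [show report.foldl
      (fun (st : PySem.Dict String (PySem.Set String) × PySem.Dict String Int) r =>
        let reporter := (pvSplit2 r).1
        let reported := (pvSplit2 r).2
        let s := st.1.getD reporter PySem.Set.empty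
        if PySem.Set.contains s reported then (st.1.insert reporter s, st.2)
        else (st.1.insert reporter (PySem.Set.add s reported), st.2.modify reported 0 (· + 1)))
      (PySem.Dict.empty, PySem.Dict.empty)
      = (report.map pvSplit2).foldl pvStepA (PySem.Dict.empty, PySem.Dict.empty)
    from (List.foldl_map (f := pvSplit2) (g := pvStepA)).symm]
  rw [pvUniq_eq]
  apply List.map_congr_left
  intro u _
  rw [pvMail_getD _ _ (report.map pvSplit2) k u h1 h2 h3, pvB_entry]

-- ===== VERDICT (by name: the statement is the Claim_ definition above) =====
theorem solution_spec : Claim_equal_solution := by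
  intro id_list report k _ _
  unfold Spec_solution
  exact solution_eq_alt id_list report k
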